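-- pv_equiv track=rewrite | github.com/pypi-data/pypi-mirror-320 | packages/nifti-overlay/nifti_overlay-0.0.1.tar.gz/nifti_overlay-0.0.1/nifti_overlay/__main__.py | parse_ordered_image_args
-- ===== SOURCE A (Python) =====
-- def parse_ordered_image_args(ordered_args):
--     """
--     Parse the ordered_args which are used to link arguments
--     to individual images.
--
--     Input is a list of 2-tuples, where the first element is the keyword/switch
--     name (dest) and the second element is the value.
--     """
--
--     image_flags = {'anat', 'checker', 'edges', 'mask'}
--     current_image = None
--     images = []
--
--     for key, value in ordered_args:
--
--         if key in image_flags: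
--
--             if current_image is not None:
--                 images.append(current_image)
--
--             current_image = {}
--             current_image['type'] = key
--             current_image['src'] = value
--
--         else:
--
--             if current_image is not None:
--                 current_image[key] = value
--
--     if current_image is not None:
--         images.append(current_image)
--
--     return images
-- ===== SOURCE B (Python) =====
-- def parse_ordered_image_args(ordered_args):
--     """Single backward pass: collect trailing attribute pairs, emit an image
--     dict whenever a flag key is reached; pairs before the first flag drop out
--     naturally (no Optional current-image state, no end-of-loop flush)."""
--     image_flags = {'anat', 'checker', 'edges', 'mask'}
--     images = []
--     pending = []  # non-flag pairs seen so far, in reverse order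
--     for key, value in reversed(ordered_args):
--         if key in image_flags:
--             image = {'type': key, 'src': value}
--             image.update(reversed(pending))
--             images.append(image)
--             pending.clear()
--         else:
--             pending.append((key, value))
--     images.reverse()
--     return images
-- ===== Notes on version B (the rewrite author's own statement) =====
-- stated objective: simpler
-- what changed: Replaces A's forward loop with an Optional current_image accumulator, mid-loop flush and end-of-loop flush by a single backward pass that collects trailing attribute pairs and emits one complete image dict at each flag key, with pre-flag pairs dropping out naturally.
import Mathlib
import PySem

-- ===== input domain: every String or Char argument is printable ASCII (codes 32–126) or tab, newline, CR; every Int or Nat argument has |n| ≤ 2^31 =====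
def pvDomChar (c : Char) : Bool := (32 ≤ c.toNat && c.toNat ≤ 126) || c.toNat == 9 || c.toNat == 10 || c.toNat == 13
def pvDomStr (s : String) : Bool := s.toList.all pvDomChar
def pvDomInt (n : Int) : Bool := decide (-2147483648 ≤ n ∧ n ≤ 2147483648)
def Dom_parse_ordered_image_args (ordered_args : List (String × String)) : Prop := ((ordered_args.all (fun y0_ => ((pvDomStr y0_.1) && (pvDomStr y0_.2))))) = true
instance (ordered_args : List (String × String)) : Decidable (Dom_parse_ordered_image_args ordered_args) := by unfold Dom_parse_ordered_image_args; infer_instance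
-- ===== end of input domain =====

-- B replaces A's forward loop with Optional current-image state and end-of-loop flush by a
-- single backward pass (collect trailing pairs, emit a dict at each flag); same cost, simpler state.

-- ===== PORT A =====
-- key in {'anat', 'checker', 'edges', 'mask'}
def pvIsFlag (k : String) : Bool := ["anat", "checker", "edges", "mask"].contains k

-- one iteration of A's loop; state = (current_image, images)
def pvStepA (st : Option (PySem.Dict String String) × List (PySem.Dict String String))
    (p : String × String) : Option (PySem.Dict String String) × List (PySem.Dict String String) :=
  if pvIsFlag p.1 then
    let images := match st.1 with
      | some d => st.2 ++ [d]
      | none => st.2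
    (some ((PySem.Dict.empty.insert "type" p.1).insert "src" p.2), images)
  else
    match st.1 with
    | some d => (some (d.insert p.1 p.2), st.2)
    | none => (none, st.2)

def parse_ordered_image_args (ordered_args : List (String × String)) : List (List (String × String)) :=
  let st := ordered_args.foldl pvStepA (none, [])
  let images := match st.1 with
    | some d => st.2 ++ [d]
    | none => st.2
  images.map PySem.Dict.items

-- ===== PORT B =====
-- image = {'type': key, 'src': value}; image.update(reversed(pending))
def pvBuildB (k v : String) (pending : List (String × String)) : PySem.Dict String String :=
  pending.reverse.foldl (fun d p => d.insert p.1 p.2)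
    ((PySem.Dict.empty.insert "type" k).insert "src" v)

-- one iteration of B's backward loop; state = (images, pending)
def pvStepB (st : List (PySem.Dict String String) × List (String × String))
    (p : String × String) : List (PySem.Dict String String) × List (String × String) :=
  if pvIsFlag p.1 then (st.1 ++ [pvBuildB p.1 p.2 st.2], [])
  else (st.1, st.2 ++ [p])

def parse_ordered_image_args_alt (ordered_args : List (String × String)) : List (List (String × String)) :=
  let st := ordered_args.reverse.foldl pvStepB ([], [])
  st.1.reverse.map PySem.Dict.items

-- ===== PRECONDITION & SPEC =====
def Spec_parse_ordered_image_args (ordered_args : List (String × String)) (out : List (List (String × String))) : Prop := out = parse_ordered_image_args_alt ordered_args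
instance (ordered_args : List (String × String)) (out : List (List (String × String))) : Decidable (Spec_parse_ordered_image_args ordered_args out) := by unfold Spec_parse_ordered_image_args; infer_instance

-- ===== CLAIM (what is proved, stated in full; the proofs are below) =====
def Claim_equal_parse_ordered_image_args : Prop := ∀ (ordered_args : List (String × String)), Dom_parse_ordered_image_args ordered_args → Spec_parse_ordered_image_args ordered_args (parse_ordered_image_args ordered_args)

-- ===== LEMMAS AND PROOFS =====

-- common specification: the list of image dicts, one per flag-headed segment
def pvGo : List (String × String) → List (PySem.Dict String String)
  | [] => []
  | p :: r =>
    if pvIsFlag p.1 then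
      pvBuildB p.1 p.2 (r.takeWhile (fun q => !pvIsFlag q.1)).reverse ::
        pvGo (r.dropWhile (fun q => !pvIsFlag q.1))
    else pvGo r
termination_by l => l.length
decreasing_by
  · exact Nat.lt_succ_of_le (List.length_dropWhile_le _ _)
  · exact Nat.lt_succ_iff.mpr (Nat.le_refl _)

lemma pvGo_dropWhile (xs : List (String × String)) :
    pvGo (xs.dropWhile (fun q => !pvIsFlag q.1)) = pvGo xs := by
  induction xs with
  | nil => rfl
  | cons p r ih =>
    by_cases h : pvIsFlag p.1 = true
    · simp [h]
    · simp only [List.dropWhile_cons, Bool.not_eq_true] at *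
      simp [h, ih, pvGo]

def pvFlush (st : Option (PySem.Dict String String) × List (PySem.Dict String String)) :
    List (PySem.Dict String String) :=
  match st.1 with
  | some d => st.2 ++ [d]
  | none => st.2

lemma pvA_inv (xs : List (String × String)) :
    (∀ images, pvFlush (xs.foldl pvStepA (none, images)) = images ++ pvGo xs) ∧
    (∀ images d, pvFlush (xs.foldl pvStepA (some d, images)) =
      images ++ (xs.takeWhile (fun q => !pvIsFlag q.1)).foldl (fun d p => d.insert p.1 p.2) d ::
        pvGo (xs.dropWhile (fun q => !pvIsFlag q.1))) := by
  induction xs with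
  | nil => exact ⟨fun images => by simp [pvFlush, pvGo], fun images d => by simp [pvFlush, pvGo]⟩
  | cons p r ih =>
    obtain ⟨h1, h2⟩ := ih
    by_cases h : pvIsFlag p.1 = true
    · refine ⟨fun images => ?_, fun images d => ?_⟩
      · simp only [List.foldl_cons, pvStepA, h, if_pos]
        rw [h2]
        simp [pvGo, h, pvBuildB, List.reverse_reverse]
      · simp only [List.foldl_cons, pvStepA, h, if_pos]
        rw [h2]
        simp [pvGo, h, pvBuildB, List.reverse_reverse]
    · refine ⟨fun images => ?_, fun images d => ?_⟩
      · simp only [List.foldl_cons, pvStepA, h, if_neg, Bool.not_eq_true]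
        rw [h1]
        simp [pvGo, h]
      · simp only [List.foldl_cons, pvStepA, h, if_neg, Bool.not_eq_true]
        rw [h2]
        simp [h]

lemma pvB_inv (xs : List (String × String)) :
    xs.reverse.foldl pvStepB ([], []) =
      ((pvGo xs).reverse, (xs.takeWhile (fun q => !pvIsFlag q.1)).reverse) := by
  rw [List.foldl_reverse]
  induction xs with
  | nil => simp [pvGo]
  | cons p r ih =>
    rw [List.foldr_cons, ih]
    by_cases h : pvIsFlag p.1 = true
    · simp [pvStepB, h, pvGo, ← pvGo_dropWhile r]
    · simp [pvStepB, h, pvGo]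

-- ===== VERDICT (by name: the statement is the Claim_ definition above) =====
theorem parse_ordered_image_args_spec : Claim_equal_parse_ordered_image_args := by
  intro xs _
  unfold Spec_parse_ordered_image_args parse_ordered_image_args parse_ordered_image_args_alt
  rw [pvB_inv]
  have := (pvA_inv xs).1 []
  simp only [pvFlush] at this
  simp [this, List.reverse_reverse]
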